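-- pv_equiv track=rewrite | github.com/muchumi/Python-DSA | checkout_time.py | checkout_time
-- ===== SOURCE A (Python) =====
-- import heapq
--
-- def checkout_time(customers, n):
--     # If there are no customers, the time required is 0.
--     if not customers:
--         return 0
--
--     # If the number of tills is greater than or equal to the number of customers,
--     # the time required is simply the maximum time of any individual customer.
--     if n >= len(customers):
--         return max(customers)
--
--     # Initialize the tills (a min-heap to keep track of the time of each till)
--     tills = [0] * n
--     heapq.heapify(tills)  # Create a min-heap
--
--     # Process each customer
--     for time in customers:
--         # Pop the till that will be free the earliest
--         earliest_free_till = heapq.heappop(tills)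
--
--         # Add the customer's checkout time to this till
--         heapq.heappush(tills, earliest_free_till + time)
--
--     # The time required will be the maximum time across all tills after all customers have checked out
--     return max(tills)
-- ===== SOURCE B (Python) =====
-- def checkout_time(customers, n):
--     if not customers:
--         return 0
--     if n >= len(customers):
--         return max(customers)
--     # tills kept as an ascending sorted list of till totals
--     tills = [0] * n
--     for t in customers:
--         x = tills.pop(0) + t          # head of a sorted list is the earliest-free till
--         i = 0
--         while i < len(tills) and tills[i] <= x:
--             i += 1
--         tills.insert(i, x)            # re-insert, keeping the list sorted
--     return tills[-1]                  # last element of a sorted list is the max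
-- ===== Notes on version B (the rewrite author's own statement) =====
-- stated objective: alternative
-- what changed: Replaces the heapq min-heap with an explicitly sorted list: pop the head (the minimum), re-insert the updated total at its sorted position by a linear scan, and return the last element instead of computing max.
import Mathlib
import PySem

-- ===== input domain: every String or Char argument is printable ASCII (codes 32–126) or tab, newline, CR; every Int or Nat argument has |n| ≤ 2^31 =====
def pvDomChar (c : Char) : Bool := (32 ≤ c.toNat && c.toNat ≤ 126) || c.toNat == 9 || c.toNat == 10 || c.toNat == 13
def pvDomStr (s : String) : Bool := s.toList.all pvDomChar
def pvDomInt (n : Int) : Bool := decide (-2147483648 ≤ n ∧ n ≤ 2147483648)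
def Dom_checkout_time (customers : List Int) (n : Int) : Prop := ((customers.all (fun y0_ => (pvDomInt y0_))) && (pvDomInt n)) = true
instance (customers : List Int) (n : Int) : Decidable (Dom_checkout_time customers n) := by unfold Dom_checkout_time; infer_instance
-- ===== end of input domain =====

-- B replaces A's heapq min-heap with an explicitly sorted list of till totals: pop the head
-- (the minimum), re-insert the updated total at its sorted position by a linear scan, and
-- read the answer off as the last element instead of computing max (objective: alternative).

-- ===== PORT A =====
-- heapq on a list of Ints: heappop removes (and returns) the minimum element, heappush adds
-- one; the internal heap layout never escapes (only min-pops and the final max are observed),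
-- so the till pool is ported as the list with the first occurrence of the minimum erased and
-- the new total appended — value-exact for heappop/heappush on every admitted input.
def checkout_time_stepA (tills : List Int) (time : Int) : List Int :=
  match PySem.List.min? tills (fun x => x) with   -- heappop: the earliest-free till (min); [] = IndexError, excluded by Pre_
  | some m => (tills.erase m) ++ [m + time]       -- heappush of m + time
  | none => tills
def checkout_time (customers : List Int) (n : Int) : Int :=
  if customers = [] then 0
  else if n ≥ (customers.length : Int) then (PySem.List.max? customers (fun x => x)).getD 0  -- max(customers); nonempty here
  else
    let tills : List Int := List.replicate n.toNat 0   -- [0] * n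
    let tills := customers.foldl checkout_time_stepA tills
    (PySem.List.max? tills (fun x => x)).getD 0        -- max(tills); nonempty under Pre_

-- ===== PORT B =====
-- the while-loop scan for the insertion point + tills.insert(i, x), as one recursive pass
def checkout_time_insB (x : Int) : List Int → List Int
  | [] => [x]
  | y :: ys => if y ≤ x then y :: checkout_time_insB x ys else x :: y :: ys
-- the for-loop over customers: pop the head, re-insert the new total in sorted position
def checkout_time_loopB : List Int → List Int → List Int
  | tills, [] => tills
  | tills, t :: rest =>
    match tills with
    | [] => []                                    -- tills.pop(0) on [] = IndexError, excluded by Pre_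
    | h :: hs => checkout_time_loopB (checkout_time_insB (h + t) hs) rest
def checkout_time_alt (customers : List Int) (n : Int) : Int :=
  if customers = [] then 0
  else if n ≥ (customers.length : Int) then (PySem.List.max? customers (fun x => x)).getD 0
  else
    let tills := checkout_time_loopB (List.replicate n.toNat 0) customers
    (PySem.List.pyGet? tills (-1)).getD 0         -- tills[-1]; nonempty under Pre_

-- ===== PRECONDITION & SPEC =====
-- With customers nonempty and n < len(customers), n ≤ 0 makes A heappop from an empty heap
-- (IndexError) and B pop(0) from an empty list (IndexError); Pre_ excludes exactly that.
def Pre_checkout_time (customers : List Int) (n : Int) : Prop := customers = [] ∨ 1 ≤ n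
instance (customers : List Int) (n : Int) : Decidable (Pre_checkout_time customers n) := by unfold Pre_checkout_time; infer_instance
def pvWitness_checkout_time : List Int × Int := ([5, 3, 4], 2)
def Spec_checkout_time (customers : List Int) (n : Int) (out : Int) : Prop := out = checkout_time_alt customers n
instance (customers : List Int) (n : Int) (out : Int) : Decidable (Spec_checkout_time customers n out) := by unfold Spec_checkout_time; infer_instance

-- ===== CLAIM (what is proved, stated in full; the proofs are below) =====
def Claim_equal_checkout_time : Prop := ∀ (customers : List Int) (n : Int), Dom_checkout_time customers n → Pre_checkout_time customers n → Spec_checkout_time customers n (checkout_time customers n)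

-- ===== LEMMAS AND PROOFS =====

-- ordered insert is a permutation of cons
theorem pv_insB_perm (x : Int) (l : List Int) :
    (checkout_time_insB x l).Perm (x :: l) := by
  induction l with
  | nil => rfl
  | cons y ys ih =>
    unfold checkout_time_insB
    split_ifs with h
    · exact (ih.cons y).trans (List.Perm.swap x y ys)
    · exact List.Perm.refl _

-- ordered insert preserves sortedness
theorem pv_insB_sorted (x : Int) (l : List Int) (hl : l.Pairwise (· ≤ ·)) :
    (checkout_time_insB x l).Pairwise (· ≤ ·) := by
  induction l with
  | nil => exact List.pairwise_cons.mpr ⟨by simp, List.Pairwise.nil⟩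
  | cons y ys ih =>
    rw [List.pairwise_cons] at hl
    unfold checkout_time_insB
    split_ifs with h
    · rw [List.pairwise_cons]
      refine ⟨?_, ih hl.2⟩
      intro b hb
      rcases List.mem_cons.mp ((pv_insB_perm x ys).mem_iff.mp hb) with rfl | h2
      · omega
      · exact hl.1 b h2
    · rw [List.pairwise_cons]
      refine ⟨?_, List.pairwise_cons.mpr hl⟩
      intro b hb
      rcases List.mem_cons.mp hb with rfl | h2
      · omega
      · have := hl.1 b h2; omega

-- sorted nonempty list: the last element is ≥ every element
theorem pv_sorted_le_getLast : ∀ (l : List Int), l.Pairwise (· ≤ ·) → ∀ (hne : l ≠ [])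
    (a : Int), a ∈ l → a ≤ l.getLast hne := by
  intro l
  induction l with
  | nil => intro _ hne; exact absurd rfl hne
  | cons y ys ih =>
    intro hl hne a ha
    rw [List.pairwise_cons] at hl
    by_cases hys : ys = []
    · subst hys
      simp at ha
      simp [ha, List.getLast]
    · rw [List.getLast_cons hys]
      rcases List.mem_cons.mp ha with rfl | h2
      · exact hl.1 _ (List.getLast_mem hys)
      · exact ih hl.2 hys a h2

-- the head of the sorted list is the value PySem's min? finds in any permuted pool
theorem pv_min_eq_head (h : Int) (hs pool : List Int) (hsort : (h :: hs).Pairwise (· ≤ ·))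
    (hperm : (h :: hs).Perm pool) :
    PySem.List.min? pool (fun x => x) = some h := by
  rcases hm : PySem.List.min? pool (fun x => x) with _ | m
  · rw [PySem.List.min?_eq_none_iff] at hm
    rw [hm] at hperm; exact absurd hperm.eq_nil (by simp)
  · have hmem : m ∈ pool := PySem.List.min?_mem hm
    have hm_le : m ≤ h := PySem.List.min?_isMin hm h (hperm.mem_iff.mp (by simp))
    have hh_le : h ≤ m := by
      rcases List.mem_cons.mp (hperm.mem_iff.mpr hmem) with rfl | h2
      · omega
      · exact (List.pairwise_cons.mp hsort).1 m h2
    rw [le_antisymm hm_le hh_le]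

-- the loop invariant: starting from a sorted nonempty list permuted with A's pool,
-- B's loop result is sorted, nonempty, and permuted with A's fold result
theorem pv_loop_inv (cs : List Int) : ∀ (tills pool : List Int),
    tills.Pairwise (· ≤ ·) → tills ≠ [] → tills.Perm pool →
    (checkout_time_loopB tills cs).Pairwise (· ≤ ·) ∧
    (checkout_time_loopB tills cs) ≠ [] ∧
    (checkout_time_loopB tills cs).Perm (cs.foldl checkout_time_stepA pool) := by
  induction cs with
  | nil => intro tills pool hs hne hp; exact ⟨hs, hne, hp⟩
  | cons t rest ih =>
    intro tills pool hs hne hp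
    cases tills with
    | nil => exact absurd rfl hne
    | cons h hs' =>
      have hsort' := (List.pairwise_cons.mp hs).2
      have hins_sorted := pv_insB_sorted (h + t) hs' hsort'
      have hins_ne : checkout_time_insB (h + t) hs' ≠ [] := by
        intro hnil
        have hlen := (pv_insB_perm (h + t) hs').length_eq
        rw [hnil] at hlen; simp at hlen
      have hstep : (checkout_time_insB (h + t) hs').Perm (checkout_time_stepA pool t) := by
        unfold checkout_time_stepA
        rw [pv_min_eq_head h hs' pool hs hp]
        have he : (pool.erase h).Perm hs' := by
          have := hp.erase h
          simp only [List.erase_cons_head] at this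
          exact this.symm
        refine (pv_insB_perm (h + t) hs').trans ?_
        refine List.Perm.trans ?_ (List.perm_append_singleton _ _).symm
        exact (List.Perm.cons _ he.symm)
      simp only [checkout_time_loopB, List.foldl_cons]
      exact ih _ _ hins_sorted hins_ne hstep

-- max? of a pool permuted with a sorted nonempty list is that list's last element
theorem pv_max_eq_getLast (res pool : List Int) (hsort : res.Pairwise (· ≤ ·)) (hne : res ≠ [])
    (hperm : res.Perm pool) :
    PySem.List.max? pool (fun x => x) = some (res.getLast hne) := by
  rcases hm : PySem.List.max? pool (fun x => x) with _ | m
  · rw [PySem.List.max?_eq_none_iff] at hm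
    rw [hm] at hperm; exact absurd hperm.eq_nil hne
  · have hmem : m ∈ res := hperm.mem_iff.mpr (PySem.List.max?_mem hm)
    have h1 : m ≤ res.getLast hne := pv_sorted_le_getLast res hsort hne m hmem
    have h2 : res.getLast hne ≤ m :=
      PySem.List.max?_isMax hm _ (hperm.mem_iff.mp (List.getLast_mem hne))
    rw [le_antisymm h1 h2]

-- ===== VERDICT (by name: the statement is the Claim_ definition above) =====
theorem checkout_time_spec : Claim_equal_checkout_time := by
  intro customers n _ hpre
  unfold Spec_checkout_time checkout_time checkout_time_alt
  split_ifs with h1 h2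
  · rfl
  · rfl
  · have hn : 1 ≤ n := by
      rcases hpre with hc | hn
      · exact absurd hc h1
      · exact hn
    have hne : (List.replicate n.toNat (0 : Int)) ≠ [] := by
      intro hnil
      have := congrArg List.length hnil
      simp at this
      omega
    obtain ⟨hsort, hres_ne, hperm⟩ :=
      pv_loop_inv customers (List.replicate n.toNat 0) (List.replicate n.toNat 0)
        (List.pairwise_replicate.mpr (Or.inr le_rfl)) hne (List.Perm.refl _)
    dsimp only
    rw [pv_max_eq_getLast _ _ hsort hres_ne hperm,
        PySem.List.pyGet?_neg_one, List.getLast?_eq_getLast_of_ne_nil hres_ne]
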